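-- pv_equiv track=rewrite | github.com/KevinKuo149/Log-Parser | Priority/parsing.py | single_parser
-- ===== SOURCE A (Python) =====
-- def single_parser(log_dict, keyword_list):
--     re_log_dict = {}
--     for key in log_dict.keys():  # log_dict.keys() are logfiles' names
--         temp_log = []
--         for index in range(len(log_dict[key])):   # log_dict[key] is a log_dict key with its all value
--             line = log_dict[key][index]
--             for one_keyword in keyword_list:
--                 if one_keyword in line:
--                     temp_log.append(line)
--                     break
--
--         if temp_log != []:
--             re_log_dict.update({key:temp_log})
--
--     return re_log_dict
-- ===== SOURCE B (Python) =====
-- def single_parser(log_dict, keyword_list):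
--     # Keyword-major scan: each keyword sweeps only the still-unmatched lines,
--     # matched lines leave the candidate pool; matches reassembled in line order.
--     out = {}
--     for key, lines in log_dict.items():
--         matched = {}
--         pending = list(enumerate(lines))
--         for kw in keyword_list:
--             if not pending:
--                 break
--             rest = []
--             for pair in pending:
--                 if kw in pair[1]:
--                     matched[pair[0]] = pair[1]
--                 else:
--                     rest.append(pair)
--             pending = rest
--         if matched:
--             out[key] = [matched[i] for i in sorted(matched)]
--     return out
-- ===== Notes on version B (the rewrite author's own statement) =====
-- stated objective: alternative
-- what changed: Replaces A's line-major loop (each line scanned against the keyword list with a break) by a keyword-major sweep: each keyword filters a shrinking pool of still-unmatched (index, line) pairs into an index-keyed dict, and the kept lines are reassembled in line order from the sorted indices.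
import Mathlib
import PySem

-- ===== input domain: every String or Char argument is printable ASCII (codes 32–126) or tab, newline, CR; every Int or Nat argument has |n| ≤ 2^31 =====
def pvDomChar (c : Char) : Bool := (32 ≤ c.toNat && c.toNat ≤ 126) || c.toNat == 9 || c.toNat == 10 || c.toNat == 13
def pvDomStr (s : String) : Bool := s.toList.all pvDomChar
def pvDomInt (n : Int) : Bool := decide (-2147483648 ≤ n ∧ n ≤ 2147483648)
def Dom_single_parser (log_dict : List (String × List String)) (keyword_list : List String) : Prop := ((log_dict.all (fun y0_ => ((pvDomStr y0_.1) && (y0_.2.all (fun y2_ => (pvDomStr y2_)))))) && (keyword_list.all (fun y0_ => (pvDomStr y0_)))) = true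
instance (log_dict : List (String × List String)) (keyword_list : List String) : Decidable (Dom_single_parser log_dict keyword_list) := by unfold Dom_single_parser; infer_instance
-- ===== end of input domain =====

-- B replaces A's line-major keyword scan by a keyword-major sweep over a shrinking
-- pool of unmatched (index, line) pairs (an alternative algorithm of similar cost).

-- ===== PORT A =====
-- inner 'for one_keyword in keyword_list: if one_keyword in line: temp_log.append(line); break'
def aInner (keyword_list : List String) (line : String) (temp_log : List String) : List String :=
  match keyword_list with
  | [] => temp_log
  | kw :: rest =>
    if PySem.Str.isIn kw line then temp_log ++ [line] else aInner rest line temp_log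

def single_parser (log_dict : List (String × List String)) (keyword_list : List String) : List (String × List String) :=
  (log_dict.foldl (fun re_log_dict kv =>
      let temp_log := (PySem.List.pyRange 0 (PySem.List.len kv.2) 1).foldl
        (fun temp_log index => aInner keyword_list (PySem.List.pyGetD kv.2 index "") temp_log) []
      if temp_log ≠ [] then re_log_dict.insert kv.1 temp_log else re_log_dict)
    (PySem.Dict.empty : PySem.Dict String (List String))).items

-- ===== PORT B =====
-- one keyword's sweep over the pending pool: matches go into the dict, the rest stay pending
def bScan (kw : String) (st : PySem.Dict Int String × List (Int × String)) (p : Int × String) :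
    PySem.Dict Int String × List (Int × String) :=
  if PySem.Str.isIn kw p.2 then (st.1.insert p.1 p.2, st.2) else (st.1, st.2 ++ [p])

def bKeywords (kws : List String) (matched : PySem.Dict Int String) (pending : List (Int × String)) :
    PySem.Dict Int String × List (Int × String) :=
  match kws with
  | [] => (matched, pending)
  | kw :: rest =>
    if pending = [] then (matched, pending)
    else
      let st := pending.foldl (bScan kw) (matched, [])
      bKeywords rest st.1 st.2

def single_parser_alt (log_dict : List (String × List String)) (keyword_list : List String) : List (String × List String) :=
  (log_dict.foldl (fun out kv =>
      let st := bKeywords keyword_list PySem.Dict.empty (PySem.List.enumerate kv.2 0)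
      if st.1.items ≠ [] then
        out.insert kv.1 ((PySem.List.sorted st.1.keys (fun i => i) false).map (fun i => st.1.getD i ""))
      else out)
    (PySem.Dict.empty : PySem.Dict String (List String))).items

-- ===== PRECONDITION & SPEC =====
def Spec_single_parser (log_dict : List (String × List String)) (keyword_list : List String) (out : List (String × List String)) : Prop := out = single_parser_alt log_dict keyword_list
instance (log_dict : List (String × List String)) (keyword_list : List String) (out : List (String × List String)) : Decidable (Spec_single_parser log_dict keyword_list out) := by unfold Spec_single_parser; infer_instance

-- ===== CLAIM (what is proved, stated in full; the proofs are below) =====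
def Claim_equal_single_parser : Prop := ∀ (log_dict : List (String × List String)) (keyword_list : List String), Dom_single_parser log_dict keyword_list → Spec_single_parser log_dict keyword_list (single_parser log_dict keyword_list)

-- ===== LEMMAS AND PROOFS =====

-- whether any keyword occurs in the line
def pvPred (kws : List String) (line : String) : Bool := kws.any (fun kw => PySem.Str.isIn kw line)

theorem aInner_eq (kws : List String) (line : String) (temp : List String) :
    aInner kws line temp = if pvPred kws line then temp ++ [line] else temp := by
  induction kws with
  | nil => simp [aInner, pvPred]
  | cons kw rest ih =>
    cases h : PySem.Str.isIn kw line
    · have hp : pvPred (kw :: rest) line = pvPred rest line := by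
        unfold pvPred; rw [List.any_cons, h, Bool.false_or]
      simp only [aInner, h, hp, ih]; simp
    · have hp : pvPred (kw :: rest) line = true := by
        unfold pvPred; rw [List.any_cons, h, Bool.true_or]
      simp only [aInner, h, hp]; simp

theorem aTemp_eq (kws : List String) (lines : List String) :
    (PySem.List.pyRange 0 (PySem.List.len lines) 1).foldl
        (fun temp_log index => aInner kws (PySem.List.pyGetD lines index "") temp_log) []
      = lines.filter (pvPred kws) := by
  rw [PySem.List.foldl_pyRange_zero_pyGetD lines "" (fun temp line => aInner kws line temp) []]
  simp only [aInner_eq]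
  exact PySem.List.foldl_append_if_eq_filter (pvPred kws) lines []

-- one keyword's conditional-insert fold (the dict half of bScan's sweep)
def condFold (kw : String) (m : PySem.Dict Int String) (pending : List (Int × String)) : PySem.Dict Int String :=
  pending.foldl (fun d p => if PySem.Chars.isIn kw.toList p.2.toList then d.insert p.1 p.2 else d) m

theorem condFold_cons (kw : String) (m : PySem.Dict Int String) (p : Int × String) (t : List (Int × String)) :
    condFold kw m (p :: t) =
      condFold kw (if PySem.Chars.isIn kw.toList p.2.toList then m.insert p.1 p.2 else m) t := rfl

theorem scan_spec (kw : String) (pending : List (Int × String)) (m : PySem.Dict Int String)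
    (acc : List (Int × String)) :
    pending.foldl (bScan kw) (m, acc) =
      (condFold kw m pending, acc ++ pending.filter (fun p => !PySem.Str.isIn kw p.2)) := by
  induction pending generalizing m acc with
  | nil => simp [condFold]
  | cons p t ih =>
    rw [List.foldl_cons, condFold_cons]
    cases hin : PySem.Chars.isIn kw.toList p.2.toList <;>
      simp [bScan, hin, ih]

theorem condFold_get?_of_ne (kw : String) (pending : List (Int × String))
    (m : PySem.Dict Int String) (i : Int)
    (h : ∀ p ∈ pending, PySem.Chars.isIn kw.toList p.2.toList = true → p.1 ≠ i) :
    (condFold kw m pending).get? i = m.get? i := by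
  induction pending generalizing m with
  | nil => rfl
  | cons p t ih =>
    rw [condFold_cons]
    cases hin : PySem.Chars.isIn kw.toList p.2.toList
    · rw [if_neg (by simp)]
      exact ih m (fun q hq => h q (List.mem_cons_of_mem _ hq))
    · rw [if_pos (by simp)]
      rw [ih _ (fun q hq => h q (List.mem_cons_of_mem _ hq))]
      exact PySem.Dict.get?_insert_of_ne _ _ (Ne.symm (h p List.mem_cons_self hin))

theorem nodup_fst_eq {α : Type} (l : List (Int × α)) (i : Int) (a b : α)
    (hnd : (l.map (·.1)).Nodup) (ha : (i, a) ∈ l) (hb : (i, b) ∈ l) : a = b := by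
  induction l with
  | nil => cases ha
  | cons p t ih =>
    simp only [List.map_cons, List.nodup_cons] at hnd
    rcases List.mem_cons.mp ha with ha' | ha' <;> rcases List.mem_cons.mp hb with hb' | hb'
    · exact (Prod.ext_iff.mp (ha'.trans hb'.symm)).2
    · exact absurd (List.mem_map.mpr ⟨(i, b), hb', by rw [← ha']⟩) hnd.1
    · exact absurd (List.mem_map.mpr ⟨(i, a), ha', by rw [← hb']⟩) hnd.1
    · exact ih hnd.2 ha' hb'

theorem condFold_get?_of_mem (kw : String) (pending : List (Int × String))
    (m : PySem.Dict Int String) (i : Int) (l : String)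
    (hnd : (pending.map (·.1)).Nodup) (hmem : (i, l) ∈ pending)
    (hin : PySem.Chars.isIn kw.toList l.toList = true) :
    (condFold kw m pending).get? i = some l := by
  induction pending generalizing m with
  | nil => cases hmem
  | cons p t ih =>
    simp only [List.map_cons, List.nodup_cons] at hnd
    rw [condFold_cons]
    rcases List.mem_cons.mp hmem with hp | hp
    · subst hp
      rw [if_pos (by simp [hin])]
      rw [condFold_get?_of_ne kw t _ i
        (fun q hq _ hqi => hnd.1 (List.mem_map.mpr ⟨q, hq, hqi⟩))]
      exact PySem.Dict.get?_insert_self _ _ _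
    · cases hin' : PySem.Chars.isIn kw.toList p.2.toList
      · rw [if_neg (by simp)]
        exact ih _ hnd.2 hp
      · rw [if_pos (by simp)]
        exact ih _ hnd.2 hp

theorem condFold_nodup_keys (kw : String) (pending : List (Int × String))
    (m : PySem.Dict Int String) (h : m.keys.Nodup) : (condFold kw m pending).keys.Nodup := by
  induction pending generalizing m with
  | nil => exact h
  | cons p t ih =>
    rw [condFold_cons]
    cases hin : PySem.Chars.isIn kw.toList p.2.toList
    · rw [if_neg (by simp)]; exact ih m h
    · rw [if_pos (by simp)]
      exact ih _ (PySem.Dict.nodup_keys_insert _ _ _ h)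

theorem pending_fst_nodup (kw : String) (pending : List (Int × String))
    (hnd : (pending.map (·.1)).Nodup) :
    ((pending.filter (fun p => !PySem.Str.isIn kw p.2)).map (·.1)).Nodup :=
  ((List.filter_sublist (l := pending)).map (·.1)).nodup hnd

theorem bKeywords_get?_none (kws : List String) (m : PySem.Dict Int String)
    (pending : List (Int × String)) (i : Int)
    (hnd : (pending.map (·.1)).Nodup)
    (h : ∀ l, (i, l) ∈ pending → pvPred kws l = false) :
    (bKeywords kws m pending).1.get? i = m.get? i := by
  induction kws generalizing m pending with
  | nil => rfl
  | cons kw rest ih =>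
    by_cases hp : pending = []
    · simp [bKeywords, hp]
    · simp only [bKeywords, hp, if_false, scan_spec, List.nil_append]
      rw [ih _ _ (pending_fst_nodup kw pending hnd)
        (fun l hl => by
          have := h l (List.mem_of_mem_filter hl)
          unfold pvPred at this ⊢
          simp only [List.any_cons, Bool.or_eq_false_iff] at this
          exact this.2)]
      exact condFold_get?_of_ne kw pending m i
        (fun q hq hq2 hqi => by
          have := h q.2 (by rw [show q = (i, q.2) from by rw [← hqi]] at hq; exact hq)
          unfold pvPred at this
          simp only [List.any_cons, Bool.or_eq_false_iff, PySem.Str.isIn_eq] at this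
          rw [hq2] at this; exact absurd this.1 (by simp))

theorem bKeywords_get?_some (kws : List String) (m : PySem.Dict Int String)
    (pending : List (Int × String)) (i : Int) (l : String)
    (hnd : (pending.map (·.1)).Nodup) (hmem : (i, l) ∈ pending)
    (hpred : pvPred kws l = true) :
    (bKeywords kws m pending).1.get? i = some l := by
  induction kws generalizing m pending with
  | nil => unfold pvPred at hpred; simp at hpred
  | cons kw rest ih =>
    have hp : pending ≠ [] := by intro h; rw [h] at hmem; cases hmem
    simp only [bKeywords, hp, if_false, scan_spec, List.nil_append]
    cases hin : PySem.Chars.isIn kw.toList l.toList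
    · have hmem' : (i, l) ∈ pending.filter (fun p => !PySem.Str.isIn kw p.2) :=
        List.mem_filter.mpr ⟨hmem, by simp [hin]⟩
      have hpred' : pvPred rest l = true := by
        unfold pvPred at hpred ⊢
        simp only [List.any_cons, PySem.Str.isIn_eq, hin, Bool.false_or] at hpred
        exact hpred
      exact ih _ _ (pending_fst_nodup kw pending hnd) hmem' hpred'
    · rw [bKeywords_get?_none rest _ _ i (pending_fst_nodup kw pending hnd)
        (fun l' hl' => by
          exfalso
          have hl'' := List.mem_of_mem_filter hl'
          have : l' = l := nodup_fst_eq pending i l' l hnd hl'' hmem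
          subst this
          have := (List.mem_filter.mp hl').2
          simp only [PySem.Str.isIn_eq, hin] at this
          simp at this)]
      exact condFold_get?_of_mem kw pending m i l hnd hmem hin

theorem bKeywords_nodup_keys (kws : List String) (m : PySem.Dict Int String)
    (pending : List (Int × String)) (h : m.keys.Nodup) :
    (bKeywords kws m pending).1.keys.Nodup := by
  induction kws generalizing m pending with
  | nil => exact h
  | cons kw rest ih =>
    by_cases hp : pending = []
    · simp only [bKeywords, hp, if_true]; exact h
    · simp only [bKeywords, hp, if_false, scan_spec, List.nil_append]
      exact ih _ _ (condFold_nodup_keys kw pending m h)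

theorem enum_fst_nodup (lines : List String) :
    ((PySem.List.enumerate lines 0).map (·.1)).Nodup := by
  rw [PySem.List.map_fst_enumerate]
  exact PySem.List.nodup_pyRange_one _ _

theorem bFinal_get?_iff (kws : List String) (lines : List String) (i : Int) (l : String) :
    (bKeywords kws PySem.Dict.empty (PySem.List.enumerate lines 0)).1.get? i = some l ↔
      ((i, l) ∈ PySem.List.enumerate lines 0 ∧ pvPred kws l = true) := by
  constructor
  · intro hg
    by_cases h : ∀ l', (i, l') ∈ PySem.List.enumerate lines 0 → pvPred kws l' = false
    · rw [bKeywords_get?_none kws _ _ i (enum_fst_nodup lines) h] at hg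
      simp [PySem.Dict.get?_empty] at hg
    · push Not at h
      obtain ⟨l', hmem, hpred⟩ := h
      have hpred' : pvPred kws l' = true := by
        cases hb : pvPred kws l'
        · exact absurd hb hpred
        · rfl
      have := bKeywords_get?_some kws PySem.Dict.empty _ i l' (enum_fst_nodup lines) hmem hpred'
      rw [this] at hg
      cases hg
      exact ⟨hmem, hpred'⟩
  · rintro ⟨hmem, hpred⟩
    exact bKeywords_get?_some kws PySem.Dict.empty _ i l (enum_fst_nodup lines) hmem hpred

theorem perFile (kws : List String) (lines : List String) :
    (PySem.List.sorted (bKeywords kws PySem.Dict.empty (PySem.List.enumerate lines 0)).1.keys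
        (fun i => i)).map
        (fun i => (bKeywords kws PySem.Dict.empty (PySem.List.enumerate lines 0)).1.getD i "")
      = lines.filter (pvPred kws) := by
  have hknd : (bKeywords kws PySem.Dict.empty (PySem.List.enumerate lines 0)).1.keys.Nodup :=
    bKeywords_nodup_keys kws _ _ PySem.Dict.nodup_keys_empty
  have hTnd : (((PySem.List.enumerate lines 0).filter (fun p => pvPred kws p.2)).map (·.1)).Nodup :=
    ((List.filter_sublist (l := PySem.List.enumerate lines 0)).map (·.1)).nodup (enum_fst_nodup lines)
  have hmemT : ∀ a,
      a ∈ ((PySem.List.enumerate lines 0).filter (fun p => pvPred kws p.2)).map (·.1) ↔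
      a ∈ (bKeywords kws PySem.Dict.empty (PySem.List.enumerate lines 0)).1.keys := by
    intro a
    constructor
    · intro ha
      obtain ⟨p, hp, hpa⟩ := List.mem_map.mp ha
      obtain ⟨hpe, hpf⟩ := List.mem_filter.mp hp
      have : (bKeywords kws PySem.Dict.empty (PySem.List.enumerate lines 0)).1.get? a = some p.2 := by
        rw [bFinal_get?_iff]
        refine ⟨?_, hpf⟩
        rw [show (a, p.2) = p from by rw [← hpa]]
        exact hpe
      rw [← PySem.Dict.contains_iff_mem_keys, PySem.Dict.contains_eq_isSome_get?, this]
      rfl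
    · intro ha
      rw [← PySem.Dict.contains_iff_mem_keys, PySem.Dict.contains_eq_isSome_get?] at ha
      obtain ⟨l, hl⟩ := Option.isSome_iff_exists.mp ha
      obtain ⟨hmem, hpred⟩ := (bFinal_get?_iff kws lines a l).mp hl
      exact List.mem_map.mpr ⟨(a, l), List.mem_filter.mpr ⟨hmem, hpred⟩, rfl⟩
  have hperm :
      (((PySem.List.enumerate lines 0).filter (fun p => pvPred kws p.2)).map (·.1)).Perm
        (bKeywords kws PySem.Dict.empty (PySem.List.enumerate lines 0)).1.keys :=
    (List.perm_ext_iff_of_nodup hTnd hknd).mpr hmemT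
  have hTpw :
      List.Pairwise (fun a b => (fun i => i) a < (fun i => i) b)
        (((PySem.List.enumerate lines 0).filter (fun p => pvPred kws p.2)).map (·.1)) := by
    rw [List.pairwise_map]
    exact (PySem.List.pairwise_lt_enumerate lines 0).sublist
      (List.filter_sublist (l := PySem.List.enumerate lines 0))
  rw [PySem.List.sorted_eq_of_perm_of_pairwise_lt _ _ _ hperm hTpw]
  rw [List.map_map]
  rw [List.map_congr_left (fun p hp => by
    obtain ⟨hpe, hpf⟩ := List.mem_filter.mp hp
    show (bKeywords kws PySem.Dict.empty (PySem.List.enumerate lines 0)).1.getD p.1 "" = p.2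
    refine PySem.Dict.getD_of_get?_eq_some _ _ ?_
    rw [bFinal_get?_iff]
    exact ⟨by rw [show (p.1, p.2) = p from rfl]; exact hpe, hpf⟩)]
  conv_rhs => rw [← PySem.List.map_snd_enumerate lines 0, List.filter_map]
  rfl

theorem perFile_items (kws : List String) (lines : List String) :
    ((bKeywords kws PySem.Dict.empty (PySem.List.enumerate lines 0)).1.items = []) ↔
      lines.filter (pvPred kws) = [] := by
  have h := congrArg List.length (perFile kws lines)
  rw [List.length_map, PySem.List.length_sorted] at h
  have hkeys : (bKeywords kws PySem.Dict.empty (PySem.List.enumerate lines 0)).1.keys.length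
      = (bKeywords kws PySem.Dict.empty (PySem.List.enumerate lines 0)).1.items.length := by
    simp only [PySem.Dict.keys, List.length_map]
  rw [hkeys] at h
  constructor
  · intro hi
    rw [← List.length_eq_zero_iff, ← h, hi]
    rfl
  · intro hf
    rw [← List.length_eq_zero_iff, h, hf]
    rfl

theorem single_parser_spec : Claim_equal_single_parser := by
  intro log_dict keyword_list _
  unfold Spec_single_parser single_parser single_parser_alt
  refine congrArg PySem.Dict.items ?_
  refine PySem.List.foldl_congr_mem log_dict _ _ _ (fun acc kv _ => ?_)
  simp only [aTemp_eq]
  by_cases hf : kv.2.filter (pvPred keyword_list) = []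
  · rw [if_neg (by simp [hf]), if_neg (by simp [(perFile_items keyword_list kv.2).mpr hf])]
  · rw [if_pos (by simp [hf])]
    rw [if_pos (show ¬(bKeywords keyword_list PySem.Dict.empty
        (PySem.List.enumerate kv.2 0)).1.items = [] from
      fun h => hf ((perFile_items keyword_list kv.2).mp h))]
    rw [perFile keyword_list kv.2]
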